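-- pv_equiv track=rewrite | github.com/dar-kin/hypeskill-regex | Regex Engine/task/regex/regex.py | check_slash
-- ===== SOURCE A (Python) =====
-- def check_slash(reg):
--     if len(reg) == 1:
--         return reg
--     li = list(reg)
--     i = 0
--     while i < len(li):
--         if i == 0:
--             if li[i] == "\\" and li[i + 1] != "\\":
--                 li.insert(i, "\\")
--                 i += 1
--         elif i == len(li) - 1:
--             if li[i] == "\\" and li[i - 1] != "\\":
--                 li.insert(i, "\\")
--                 i += 1
--         else:
--             if li[i] == "\\" and (li[i - 1] != "\\" or li[i + 1] != "\\"):
--                 li.insert(i, "\\")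
--                 i += 1
--         i += 1
--     return "".join(li)
-- ===== SOURCE B (Python) =====
-- import re
--
-- def check_slash(reg):
--     # Double every backslash that has at least one adjacent non-backslash
--     # character (lookbehind OR lookahead); a lambda replacement avoids
--     # re.sub's own backslash escaping.
--     return re.sub(r'(?<=[^\\])\\|\\(?=[^\\])', lambda m: '\\\\', reg)
-- ===== Notes on version B (the rewrite author's own statement) =====
-- stated objective: idiomatic
-- what changed: Replaced the index-juggling while loop with in-place list inserts by a single regex substitution that doubles each backslash having an adjacent non-backslash neighbor.
import Mathlib
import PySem

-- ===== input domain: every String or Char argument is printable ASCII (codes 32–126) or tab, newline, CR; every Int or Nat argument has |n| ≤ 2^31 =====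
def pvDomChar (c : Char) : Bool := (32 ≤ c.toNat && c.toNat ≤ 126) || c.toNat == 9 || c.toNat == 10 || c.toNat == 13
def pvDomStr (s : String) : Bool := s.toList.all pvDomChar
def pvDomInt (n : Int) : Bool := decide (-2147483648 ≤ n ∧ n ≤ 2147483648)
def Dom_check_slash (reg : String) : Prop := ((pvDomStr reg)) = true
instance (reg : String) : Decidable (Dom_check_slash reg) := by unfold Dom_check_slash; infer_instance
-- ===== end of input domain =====

-- ===== PORT A =====
-- Python's li.insert(i, x) with 0 ≤ i ≤ len(li) is exactly List.insertIdx i x li.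
-- li[i], li[i+1], li[i-1] are ported with getD: every index A reads is in range on
-- every input reachable from check_slash (len(reg) ≠ 1 there), so getD is exact.
def check_slash_loop (li : List Char) (i : Nat) : List Char :=
  if _h : i < li.length then
    if i = 0 then
      if li.getD i 'x' = '\\' ∧ li.getD (i + 1) 'x' ≠ '\\' then
        check_slash_loop (li.insertIdx i '\\') (i + 2)
      else
        check_slash_loop li (i + 1)
    else if i = li.length - 1 then
      if li.getD i 'x' = '\\' ∧ li.getD (i - 1) 'x' ≠ '\\' then
        check_slash_loop (li.insertIdx i '\\') (i + 2)
      else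
        check_slash_loop li (i + 1)
    else
      if li.getD i 'x' = '\\' ∧ (li.getD (i - 1) 'x' ≠ '\\' ∨ li.getD (i + 1) 'x' ≠ '\\') then
        check_slash_loop (li.insertIdx i '\\') (i + 2)
      else
        check_slash_loop li (i + 1)
  else li
termination_by li.length - i
decreasing_by
  all_goals first
    | (rw [List.length_insertIdx_of_le_length (by omega)]; omega)
    | omega

def check_slash (reg : String) : String :=
  if PySem.Str.len reg = 1 then reg
  else String.ofList (check_slash_loop reg.toList 0)

-- ===== PORT B =====
-- Hand port of Source B's re.sub(r'(?<=[^\\])\\|\\(?=[^\\])', lambda m: '\\\\', reg):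
-- the pattern matches exactly one '\' character whose previous char (lookbehind) or
-- next char (lookahead) exists and is not '\'; re.sub therefore is a left-to-right
-- scan emitting '\\' for each such char and the char itself otherwise — exact on
-- every string, since every match is a single character.
def pvNbMatch : Option Char → Bool
  | some q => q ≠ '\\'
  | none => false

def check_slash_scan : Option Char → List Char → List Char
  | _, [] => []
  | p, c :: rest =>
    (if c = '\\' ∧ (pvNbMatch p ∨ pvNbMatch rest.head?) then ['\\', '\\'] else [c])
      ++ check_slash_scan (some c) rest

def check_slash_alt (reg : String) : String :=
  String.ofList (check_slash_scan none reg.toList)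

-- ===== PRECONDITION & SPEC =====
def Spec_check_slash (reg : String) (out : String) : Prop := out = check_slash_alt reg
instance (reg : String) (out : String) : Decidable (Spec_check_slash reg out) := by unfold Spec_check_slash; infer_instance

-- ===== CLAIM (what is proved, stated in full; the proofs are below) =====
def Claim_equal_check_slash : Prop := ∀ (reg : String), Dom_check_slash reg → Spec_check_slash reg (check_slash reg)

-- ===== LEMMAS AND PROOFS =====

lemma pv_insertIdx_append (done rest : List Char) (v : Char) :
    (done ++ rest).insertIdx done.length v = done ++ v :: rest := by
  induction done with
  | nil => rfl
  | cons a done ih => simp [List.insertIdx_succ_cons, ih]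

lemma check_slash_loop_main :
    ∀ (rest done : List Char) (p : Option Char),
      (p = none ↔ done = []) →
      (∀ q, p = some q → done.getLast? = some q) →
      (done = [] → rest.length ≠ 1) →
      check_slash_loop (done ++ rest) done.length = done ++ check_slash_scan p rest := by
  intro rest
  induction rest with
  | nil =>
    intro done p _ _ _
    rw [check_slash_loop]
    simp [check_slash_scan]
  | cons c rest' ih =>
    intro done p hnone hlast hlen1
    rw [check_slash_loop, check_slash_scan]
    have hin : done.length < (done ++ c :: rest').length := by simp
    rw [dif_pos hin]
    rcases eq_or_ne done [] with hd | hd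
    · -- i = 0
      subst hd
      have hp : p = none := hnone.mpr rfl
      subst hp
      rw [if_pos (by simp : List.length ([] : List Char) = 0)]
      match rest' with
      | [] => exact absurd rfl (hlen1 rfl)
      | d :: rest'' =>
        have g0 : ([] ++ c :: d :: rest'').getD (List.length ([] : List Char)) 'x' = c := rfl
        have g1 : ([] ++ c :: d :: rest'').getD (List.length ([] : List Char) + 1) 'x' = d := rfl
        rw [g0, g1]
        have hiff : (pvNbMatch none = true ∨ pvNbMatch ((d :: rest'').head?) = true) ↔ ¬ d = '\\' := by
          simp [pvNbMatch]
        by_cases hc : c = '\\' ∧ ¬ d = '\\'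
        · rw [if_pos hc, if_pos ⟨hc.1, hiff.mpr hc.2⟩]
          obtain ⟨hc1, hc2⟩ := hc; subst hc1
          have := ih ['\\', '\\'] (some '\\') (by simp) (by simp) (by simp)
          simpa [List.insertIdx] using this
        · rw [if_neg hc, if_neg (fun h => hc ⟨h.1, hiff.mp h.2⟩)]
          have := ih [c] (some c) (by simp) (by simp) (by simp)
          simpa using this
    · -- i ≥ 1
      have hi0 : ¬ done.length = 0 := by simpa [List.length_eq_zero_iff] using hd
      rw [if_neg hi0]
      obtain ⟨q, hq⟩ : ∃ q, p = some q := by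
        cases p with
        | none => exact absurd (hnone.mp rfl) hd
        | some q => exact ⟨q, rfl⟩
      subst hq
      have hql : done.getLast? = some q := hlast q rfl
      have hgetc : (done ++ c :: rest').getD done.length 'x' = c := by
        simp [List.getD]
      have hgetp : (done ++ c :: rest').getD (done.length - 1) 'x' = q := by
        have h1 : done.length - 1 < done.length := by omega
        rw [List.getD, List.getElem?_append_left h1]
        rw [List.getLast?_eq_getElem?] at hql
        simp [hql]
      have hiffp : (pvNbMatch (some q) = true) ↔ ¬ q = '\\' := by simp [pvNbMatch]
      match rest' with
      | [] =>
        -- i = len - 1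
        have hlst : done.length = (done ++ [c]).length - 1 := by simp
        rw [if_pos hlst, hgetc, hgetp]
        have hiff : (pvNbMatch (some q) = true ∨ pvNbMatch (([] : List Char).head?) = true) ↔ ¬ q = '\\' := by
          simp [pvNbMatch]
        by_cases hc : c = '\\' ∧ ¬ q = '\\'
        · rw [if_pos hc, if_pos ⟨hc.1, hiff.mpr hc.2⟩]
          obtain ⟨hc1, _⟩ := hc; subst hc1
          have := ih (done ++ ['\\', '\\']) (some '\\') (by simp) (by simp) (by simp [hd])
          have hins : (done ++ ['\\']).insertIdx done.length '\\' = done ++ ['\\', '\\'] := by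
            simpa using pv_insertIdx_append done ['\\'] '\\'
          have hlen2 : done.length + 2 = (done ++ ['\\', '\\']).length := by simp
          rw [hins, hlen2]
          simpa using this
        · rw [if_neg hc, if_neg (fun h => hc ⟨h.1, hiff.mp h.2⟩)]
          have := ih (done ++ [c]) (some c) (by simp) (by simp) (by simp [hd])
          have hlen2 : done.length + 1 = (done ++ [c]).length := by simp
          rw [show done ++ [c] = (done ++ [c]) ++ [] by simp, hlen2]
          simpa using this
      | d :: rest'' =>
        -- middle
        have hmid : ¬ done.length = (done ++ c :: d :: rest'').length - 1 := by
          simp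
        rw [if_neg hmid, hgetc, hgetp]
        have hgetn : (done ++ c :: d :: rest'').getD (done.length + 1) 'x' = d := by
          rw [List.getD, List.getElem?_append_right (by omega : done.length ≤ done.length + 1)]
          simp
        rw [hgetn]
        have hiff : (pvNbMatch (some q) = true ∨ pvNbMatch ((d :: rest'').head?) = true) ↔
            (¬ q = '\\' ∨ ¬ d = '\\') := by
          simp [pvNbMatch]
        by_cases hc : c = '\\' ∧ (¬ q = '\\' ∨ ¬ d = '\\')
        · rw [if_pos hc, if_pos ⟨hc.1, hiff.mpr hc.2⟩]
          obtain ⟨hc1, _⟩ := hc; subst hc1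
          have := ih (done ++ ['\\', '\\']) (some '\\') (by simp) (by simp) (by simp [hd])
          have hins : (done ++ '\\' :: d :: rest'').insertIdx done.length '\\'
              = (done ++ ['\\', '\\']) ++ d :: rest'' := by
            rw [pv_insertIdx_append done ('\\' :: d :: rest'') '\\']
            simp
          have hlen2 : done.length + 2 = (done ++ ['\\', '\\']).length := by simp
          rw [hins, hlen2, this, List.append_assoc]
        · rw [if_neg hc, if_neg (fun h => hc ⟨h.1, hiff.mp h.2⟩)]
          have := ih (done ++ [c]) (some c) (by simp) (by simp) (by simp [hd])
          have hlen2 : done.length + 1 = (done ++ [c]).length := by simp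
          rw [show done ++ c :: d :: rest'' = (done ++ [c]) ++ d :: rest'' by simp,
            hlen2, this, List.append_assoc]

-- ===== VERDICT (by name: the statement is the Claim_ definition above) =====
theorem check_slash_spec : Claim_equal_check_slash := by
  intro reg _
  unfold Spec_check_slash check_slash check_slash_alt
  by_cases h1 : PySem.Str.len reg = 1
  · rw [if_pos h1]
    have hl1 : reg.toList.length = 1 := by simpa [PySem.Str.len_eq] using h1
    match hl : reg.toList, hl1 with
    | [c], _ =>
      have : check_slash_scan none [c] = [c] := by simp [check_slash_scan, pvNbMatch]
      rw [this]
      conv_lhs => rw [← String.ofList_toList (s := reg), hl]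
  · rw [if_neg h1]
    have hlen : reg.toList.length ≠ 1 := by simpa [PySem.Str.len_eq] using h1
    have := check_slash_loop_main reg.toList [] none (by simp) (by simp) (fun _ => hlen)
    exact congrArg String.ofList (by simpa using this)
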